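-- pv_equiv track=rewrite | github.com/NilK-Duy/algorithm-with-python | w3QuickSort/firstQuickSort.py | quicksort_comparison_count
-- ===== SOURCE A (Python) =====
-- def quicksort_comparison_count(arr):
--     # Base case: if the array has one element or is empty, no comparisons needed
--     if len(arr) <= 1:
--         return 0, arr
--
--     # Initialize comparisons with the number of elements minus one
--     comparisons = len(arr) - 1
--     # Choose the first element as the pivot
--     pivot = arr[0]
--
--     # Initialize the index to track the position to swap
--     swap_index = 1
--
--     # Iterate through the array starting from the second element
--     for i in range(1, len(arr)):
--         if arr[i] < pivot:
--             # Swap current element with the element at swap_index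
--             arr[i], arr[swap_index] = arr[swap_index], arr[i]
--             # Move the swap_index to the next position
--             swap_index += 1
--
--     # Swap the pivot with the last element in the lower partition
--     arr[0], arr[swap_index - 1] = arr[swap_index - 1], arr[0]
--
--     # Partition the array into low and high based on the swap_index
--     low = arr[:swap_index - 1]
--     high = arr[swap_index:]
--
--     # Recursively perform QuickSort on the low and high partitions
--     left_comparisons, left_sorted = quicksort_comparison_count(low)
--     right_comparisons, right_sorted = quicksort_comparison_count(high)
--
--     # Combine the results and the pivot to get the fully sorted array
--     return comparisons + left_comparisons + right_comparisons, left_sorted + [pivot] + right_sorted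
-- ===== SOURCE B (Python) =====
-- def quicksort_comparison_count(arr):
--     # Iterative in-place quicksort (first-element pivot, Lomuto partition)
--     # driven by an explicit stack of index ranges; counts one comparison per
--     # non-pivot element of each partitioned range.
--     a = list(arr)
--     comparisons = 0
--     stack = [(0, len(a) - 1)]
--     while stack:
--         lo, hi = stack.pop()
--         if hi <= lo:
--             continue
--         comparisons += hi - lo
--         pivot = a[lo]
--         swap_index = lo + 1
--         for i in range(lo + 1, hi + 1):
--             if a[i] < pivot:
--                 a[i], a[swap_index] = a[swap_index], a[i]
--                 swap_index += 1
--         a[lo], a[swap_index - 1] = a[swap_index - 1], a[lo]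
--         stack.append((swap_index, hi))
--         stack.append((lo, swap_index - 2))
--     return comparisons, a
-- ===== Notes on version B (the rewrite author's own statement) =====
-- stated objective: alternative
-- what changed: A is a recursive quicksort that copies its partitions out with slices and rebuilds the result by list concatenation; B sorts a single array fully in place, replacing the recursion by an explicit stack of (lo, hi) index ranges and accumulating the comparison count in one loop, with no slicing or concatenation.
import Mathlib
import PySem

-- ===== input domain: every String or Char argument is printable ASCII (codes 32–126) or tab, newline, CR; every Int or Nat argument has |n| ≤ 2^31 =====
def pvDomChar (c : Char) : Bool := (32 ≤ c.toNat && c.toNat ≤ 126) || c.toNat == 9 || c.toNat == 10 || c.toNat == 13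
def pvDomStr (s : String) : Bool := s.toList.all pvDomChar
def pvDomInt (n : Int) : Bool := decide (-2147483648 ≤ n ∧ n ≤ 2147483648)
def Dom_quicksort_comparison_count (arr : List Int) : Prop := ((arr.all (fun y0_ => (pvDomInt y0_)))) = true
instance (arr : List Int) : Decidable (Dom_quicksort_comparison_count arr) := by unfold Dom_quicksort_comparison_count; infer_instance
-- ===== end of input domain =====

-- B replaces A's recursive slice-and-concatenate quicksort by an iterative
-- in-place quicksort over one array, driven by an explicit stack of (lo, hi)
-- index ranges (objective: alternative decomposition, no slicing/copying).
-- Equivalence is about the RETURN value only: Python A partially partitions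
-- its argument list in place, Python B copies it and does not mutate it.

-- ===== PORT A =====
-- the body of A's `for i in range(1, len(arr))` loop (simultaneous swap
-- assignment: both right-hand sides are read from the old list, then the two
-- cells are written).  B's inner loop body is textually the same, so this
-- helper is shared by both ports.
def qccSwapStep (pivot : Int) (st : List Int × Int) (i : Int) : List Int × Int :=
  if PySem.List.pyGetD st.1 i 0 < pivot then
    (PySem.List.pySetD (PySem.List.pySetD st.1 i (PySem.List.pyGetD st.1 st.2 0)) st.2
       (PySem.List.pyGetD st.1 i 0),
     st.2 + 1)
  else st

-- facts the ports need for termination (cited in decreasing_by)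
theorem qccLoop_length (pivot : Int) (idx : List Int) :
    ∀ (st : List Int × Int), ((idx.foldl (qccSwapStep pivot) st).1).length = st.1.length := by
  induction idx with
  | nil => intro st; rfl
  | cons i idx ih =>
    intro st
    rw [List.foldl_cons, ih]
    unfold qccSwapStep
    split <;> simp

theorem qccLoop_si_bounds (pivot : Int) (idx : List Int) :
    ∀ (st : List Int × Int), st.2 ≤ (idx.foldl (qccSwapStep pivot) st).2 ∧
      (idx.foldl (qccSwapStep pivot) st).2 ≤ st.2 + idx.length := by
  induction idx with
  | nil => intro st; simp
  | cons i idx ih =>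
    intro st
    rw [List.foldl_cons]
    have h := ih (qccSwapStep pivot st i)
    have hstep : st.2 ≤ (qccSwapStep pivot st i).2 ∧ (qccSwapStep pivot st i).2 ≤ st.2 + 1 := by
      unfold qccSwapStep; split <;> simp
    constructor
    · exact le_trans hstep.1 h.1
    · calc (idx.foldl (qccSwapStep pivot) (qccSwapStep pivot st i)).2
          ≤ (qccSwapStep pivot st i).2 + idx.length := h.2
        _ ≤ st.2 + 1 + idx.length := by omega
        _ = st.2 + (i :: idx).length := by simp; omega

theorem qcc_A_si_bounds (pivot : Int) (arr : List Int) (hn : ¬ arr.length ≤ 1) :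
    1 ≤ ((PySem.List.pyRange 1 (arr.length : Int) 1).foldl (qccSwapStep pivot) (arr, 1)).2 ∧
      ((PySem.List.pyRange 1 (arr.length : Int) 1).foldl (qccSwapStep pivot) (arr, 1)).2
        ≤ (arr.length : Int) := by
  have h := qccLoop_si_bounds pivot (PySem.List.pyRange 1 (arr.length : Int) 1) (arr, 1)
  simp only [PySem.List.length_pyRange_one] at h
  constructor
  · exact h.1
  · have h2 := h.2
    omega

theorem qcc_len2 (L : List Int) (i v j w : Int) (n : Nat) (h : L.length = n) :
    (PySem.List.pySetD (PySem.List.pySetD L i v) j w).length = n := by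
  simp [PySem.List.length_pySetD, h]

theorem qcc_A_dec_low (n : Nat) (L0 : List Int) (si : Int) (hL : L0.length = n)
    (h1 : 1 ≤ si) (h2 : si ≤ (n : Int)) (hn : ¬ n ≤ 1) :
    (PySem.List.slice L0 none (some (si - 1))).length < n := by
  have hs : (PySem.List.slice L0 none (some (si - 1))).length = min (si - 1).toNat L0.length := by
    simp [PySem.List.slice_to (xs := L0) (by omega : (0 : Int) ≤ si - 1)]
  omega

theorem qcc_A_dec_high (n : Nat) (L0 : List Int) (si : Int) (hL : L0.length = n)
    (h1 : 1 ≤ si) (hn : ¬ n ≤ 1) :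
    (PySem.List.slice L0 (some si) none).length < n := by
  have hs : (PySem.List.slice L0 (some si) none).length = L0.length - si.toNat := by
    simp [PySem.List.slice_from (xs := L0) (by omega : (0 : Int) ≤ si)]
  omega

def quicksort_comparison_count (arr : List Int) : Int × List Int :=
  if _h : arr.length ≤ 1 then (0, arr)
  else
    let comparisons : Int := (arr.length : Int) - 1
    let pivot : Int := PySem.List.pyGetD arr 0 0
    let st := (PySem.List.pyRange 1 (arr.length : Int) 1).foldl (qccSwapStep pivot) (arr, 1)
    let lst := PySem.List.pySetD
      (PySem.List.pySetD st.1 0 (PySem.List.pyGetD st.1 (st.2 - 1) 0)) (st.2 - 1)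
      (PySem.List.pyGetD st.1 0 0)
    let low := PySem.List.slice lst none (some (st.2 - 1))
    let high := PySem.List.slice lst (some st.2) none
    let left := quicksort_comparison_count low
    let right := quicksort_comparison_count high
    (comparisons + left.1 + right.1, left.2 ++ [pivot] ++ right.2)
termination_by arr.length
decreasing_by
  · exact qcc_A_dec_low arr.length lst st.2
      (qcc_len2 st.1 0 (PySem.List.pyGetD st.1 (st.2 - 1) 0) (st.2 - 1) (PySem.List.pyGetD st.1 0 0)
        arr.length (qccLoop_length pivot (PySem.List.pyRange 1 (arr.length : Int) 1) (arr, 1)))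
      (qcc_A_si_bounds pivot arr _h).1 (qcc_A_si_bounds pivot arr _h).2 _h
  · exact qcc_A_dec_high arr.length lst st.2
      (qcc_len2 st.1 0 (PySem.List.pyGetD st.1 (st.2 - 1) 0) (st.2 - 1) (PySem.List.pyGetD st.1 0 0)
        arr.length (qccLoop_length pivot (PySem.List.pyRange 1 (arr.length : Int) 1) (arr, 1)))
      (qcc_A_si_bounds pivot arr _h).1 _h

-- ===== PORT B =====
-- combined size of the pending index ranges (termination measure of the stack loop)
def qccWeight (st : List (Int × Int)) : Nat :=
  (st.map (fun q => (q.2 - q.1 + 1).toNat)).sum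

-- termination facts for the stack loop (cited in decreasing_by)
theorem qcc_si_bounds (pivot lo hi : Int) (a : List Int) :
    lo + 1 ≤ ((PySem.List.pyRange (lo + 1) (hi + 1) 1).foldl (qccSwapStep pivot) (a, lo + 1)).2 ∧
      ((PySem.List.pyRange (lo + 1) (hi + 1) 1).foldl (qccSwapStep pivot) (a, lo + 1)).2
        ≤ lo + 1 + ((hi + 1 - (lo + 1)).toNat : Int) := by
  have h := qccLoop_si_bounds pivot (PySem.List.pyRange (lo + 1) (hi + 1) 1) (a, lo + 1)
  simp only [PySem.List.length_pyRange_one] at h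
  exact h

theorem qcc_lex_pop (lo hi : Int) (stk : List (Int × Int)) :
    Prod.Lex (fun a₁ a₂ : Nat => a₁ < a₂) (fun a₁ a₂ : Nat => a₁ < a₂)
      (qccWeight stk, stk.length) (qccWeight ((lo, hi) :: stk), ((lo, hi) :: stk).length) := by
  have hle : qccWeight stk ≤ qccWeight ((lo, hi) :: stk) := by simp [qccWeight]
  rcases lt_or_eq_of_le hle with h | h
  · exact Prod.Lex.left _ _ h
  · rw [h]; exact Prod.Lex.right _ (by simp)

theorem qcc_lex_split (lo hi si : Int) (stk : List (Int × Int)) (hgt : ¬ hi ≤ lo)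
    (h1 : lo + 1 ≤ si) (h2 : si ≤ lo + 1 + ((hi + 1 - (lo + 1)).toNat : Int)) :
    Prod.Lex (fun a₁ a₂ : Nat => a₁ < a₂) (fun a₁ a₂ : Nat => a₁ < a₂)
      (qccWeight ((lo, si - 2) :: (si, hi) :: stk), ((lo, si - 2) :: (si, hi) :: stk).length)
      (qccWeight ((lo, hi) :: stk), ((lo, hi) :: stk).length) := by
  apply Prod.Lex.left
  simp only [qccWeight, List.map_cons, List.sum_cons]
  omega

-- B's `while stack:` loop; state = (array, comparison count, stack of ranges)
def qccLoop : List Int → Int → List (Int × Int) → Int × List Int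
  | a, c, [] => (c, a)
  | a, c, (lo, hi) :: stk =>
    if hle : hi ≤ lo then qccLoop a c stk
    else
      let pivot := PySem.List.pyGetD a lo 0
      let s2 := (PySem.List.pyRange (lo + 1) (hi + 1) 1).foldl (qccSwapStep pivot) (a, lo + 1)
      let a2 := PySem.List.pySetD
        (PySem.List.pySetD s2.1 lo (PySem.List.pyGetD s2.1 (s2.2 - 1) 0)) (s2.2 - 1)
        (PySem.List.pyGetD s2.1 lo 0)
      qccLoop a2 (c + (hi - lo)) ((lo, s2.2 - 2) :: (s2.2, hi) :: stk)
termination_by _ _ stk => (qccWeight stk, stk.length)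
decreasing_by
  · exact qcc_lex_pop lo hi stk
  · exact qcc_lex_split lo hi s2.2 stk hle (qcc_si_bounds pivot lo hi a).1 (qcc_si_bounds pivot lo hi a).2

def quicksort_comparison_count_alt (arr : List Int) : Int × List Int :=
  qccLoop arr 0 [(0, (arr.length : Int) - 1)]

-- ===== PRECONDITION & SPEC =====
def Spec_quicksort_comparison_count (arr : List Int) (out : Int × List Int) : Prop := out = quicksort_comparison_count_alt arr
instance (arr : List Int) (out : Int × List Int) : Decidable (Spec_quicksort_comparison_count arr out) := by unfold Spec_quicksort_comparison_count; infer_instance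

-- ===== CLAIM (what is proved, stated in full; the proofs are below) =====
def Claim_equal_quicksort_comparison_count : Prop := ∀ (arr : List Int), Dom_quicksort_comparison_count arr → Spec_quicksort_comparison_count arr (quicksort_comparison_count arr)

-- ===== LEMMAS AND PROOFS =====

-- the abstract form of one swap-loop iteration: smalls S grow at the back,
-- the bigs block rotates one step left when a small element lands in it
def qccPartAbs (p : Int) (sb : List Int × List Int) (x : Int) : List Int × List Int :=
  if x < p then
    (sb.1 ++ [x],
     match sb.2 with
     | [] => []
     | b :: bs => bs ++ [b])
  else (sb.1, sb.2 ++ [x])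

theorem qccPartAbs_lengths (p : Int) (rest : List Int) :
    ∀ (sb : List Int × List Int),
      (rest.foldl (qccPartAbs p) sb).1.length + (rest.foldl (qccPartAbs p) sb).2.length
        = sb.1.length + sb.2.length + rest.length := by
  induction rest with
  | nil => intro sb; simp
  | cons x t ih =>
    intro sb
    rw [List.foldl_cons, ih]
    unfold qccPartAbs
    split
    · rcases sb with ⟨s, b⟩
      cases b <;> simp <;> omega
    · simp
      omega

-- reading/writing through a prefix context
theorem qcc_getD_pre (pre xs : List Int) (k : Nat) (d : Int) :
    (pre ++ xs).getD (pre.length + k) d = xs.getD k d := by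
  rw [List.getD_append_right _ _ _ _ (by omega)]
  simp

theorem qcc_set_pre (pre xs : List Int) (k : Nat) (v : Int) :
    (pre ++ xs).set (pre.length + k) v = pre ++ xs.set k v := by
  rw [List.set_append, if_neg (by omega)]
  simp

-- reading the element the loop looks at: position 1+|S|+|B| of p :: S ++ (B ++ x :: t)
theorem qcc_getD_cur (p x d : Int) (S B t : List Int) :
    (p :: (S ++ (B ++ x :: t))).getD (1 + S.length + B.length) d = x := by
  rw [show 1 + S.length + B.length = (S.length + B.length) + 1 from by omega]
  rw [List.getD_cons_succ]
  rw [List.getD_append_right _ _ _ _ (by omega)]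
  rw [show S.length + B.length - S.length = B.length from by omega]
  rw [List.getD_append_right _ _ _ _ (by omega), Nat.sub_self]
  simp

-- reading the element at the swap index: position |S|+1 of p :: S ++ R
theorem qcc_getD_si (p d : Int) (S R : List Int) :
    (p :: (S ++ R)).getD (S.length + 1) d = R.getD 0 d := by
  rw [List.getD_cons_succ, List.getD_append_right _ _ _ _ (le_refl _), Nat.sub_self]

theorem qcc_set_cur (p v x : Int) (S B t : List Int) :
    (p :: (S ++ (B ++ x :: t))).set (1 + S.length + B.length) v = p :: (S ++ (B ++ v :: t)) := by
  rw [show 1 + S.length + B.length = (S.length + B.length) + 1 from by omega]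
  rw [List.set_cons_succ]
  congr 1
  rw [List.set_append, if_neg (by omega)]
  congr 1
  rw [show S.length + B.length - S.length = B.length from by omega]
  rw [List.set_append, if_neg (by omega), Nat.sub_self]
  simp

theorem qcc_set_si (p v : Int) (S R : List Int) :
    (p :: (S ++ R)).set (S.length + 1) v = p :: (S ++ R.set 0 v) := by
  rw [List.set_cons_succ]
  congr 1
  rw [List.set_append, if_neg (by omega), Nat.sub_self]

-- one iteration of the swap loop, embedded behind a prefix context `pre`,
-- is one step of the abstract partition builder
theorem qcc_step_eq (p x : Int) (pre S B t : List Int) :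
    qccSwapStep p (pre ++ p :: (S ++ (B ++ x :: t)), (pre.length : Int) + S.length + 1)
        ((pre.length : Int) + 1 + S.length + B.length)
      = (pre ++ p :: ((qccPartAbs p (S, B) x).1 ++ ((qccPartAbs p (S, B) x).2 ++ t)),
         (pre.length : Int) + (qccPartAbs p (S, B) x).1.length + 1) := by
  have eI : (pre.length : Int) + S.length + 1 = ((pre.length + (S.length + 1) : Nat) : Int) := by
    push_cast; ring
  have eC : (pre.length : Int) + 1 + S.length + B.length
      = ((pre.length + (1 + S.length + B.length) : Nat) : Int) := by push_cast; ring
  unfold qccSwapStep qccPartAbs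
  simp only [eI, eC, PySem.List.pyGetD_natCast, PySem.List.pySetD_natCast]
  rw [qcc_getD_pre, qcc_getD_cur]
  by_cases hx : x < p
  · rw [if_pos hx, if_pos hx]
    rw [qcc_set_pre, qcc_set_cur, qcc_getD_pre, qcc_getD_si]
    cases B with
    | nil =>
      simp only [List.nil_append, List.getD_cons_zero]
      rw [qcc_set_pre]
      rw [show (x :: t : List Int) = ([] : List Int) ++ x :: t from rfl, qcc_set_si]
      simp only [Prod.mk.injEq]
      constructor
      · simp [List.append_assoc]
      · push_cast [List.length_append, List.length_cons, List.length_nil]; ring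
    | cons b bs =>
      simp only [List.cons_append, List.getD_cons_zero]
      rw [qcc_set_pre]
      rw [show (b :: (bs ++ b :: t) : List Int) = ((b :: (bs ++ b :: t)) : List Int) from rfl]
      rw [qcc_set_si]
      simp only [Prod.mk.injEq]
      constructor
      · simp [List.append_assoc]
      · push_cast [List.length_append, List.length_cons, List.length_nil]; ring
  · rw [if_neg hx, if_neg hx]
    simp only [Prod.mk.injEq]
    constructor
    · simp [List.append_assoc]
    · push_cast; ring

-- the whole swap loop over the todo block, behind the context, against the
-- whole abstract partition fold
theorem qcc_loop_inv (p : Int) (pre suf : List Int) :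
    ∀ (todo S B : List Int),
      (PySem.List.pyRange ((pre.length : Int) + 1 + S.length + B.length)
          ((pre.length : Int) + 1 + S.length + B.length + todo.length) 1).foldl
        (qccSwapStep p)
        (pre ++ p :: (S ++ (B ++ (todo ++ suf))), (pre.length : Int) + S.length + 1)
      = (pre ++ p :: ((todo.foldl (qccPartAbs p) (S, B)).1
            ++ ((todo.foldl (qccPartAbs p) (S, B)).2 ++ suf)),
         (pre.length : Int) + ((todo.foldl (qccPartAbs p) (S, B)).1.length : Int) + 1) := by
  intro todo
  induction todo with
  | nil =>
    intro S B
    rw [PySem.List.pyRange_one_eq_nil (by simp)]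
    simp
  | cons x t ih =>
    intro S B
    have hlen : (qccPartAbs p (S, B) x).1.length + (qccPartAbs p (S, B) x).2.length
        = S.length + B.length + 1 := by
      have := qccPartAbs_lengths p [x] (S, B)
      simpa using this
    rw [PySem.List.pyRange_one_cons (by push_cast [List.length_cons]; omega), List.foldl_cons]
    rw [show ((x :: t) ++ suf : List Int) = x :: (t ++ suf) from rfl]
    rw [qcc_step_eq]
    have hb1 : (pre.length : Int) + 1 + S.length + B.length + 1
        = (pre.length : Int) + 1 + (qccPartAbs p (S, B) x).1.length + (qccPartAbs p (S, B) x).2.length := by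
      push_cast; omega
    have hb2 : (pre.length : Int) + 1 + S.length + B.length + ((x :: t).length : Int)
        = (pre.length : Int) + 1 + (qccPartAbs p (S, B) x).1.length + (qccPartAbs p (S, B) x).2.length
            + (t.length : Int) := by
      push_cast [List.length_cons]; omega
    rw [hb1, hb2, ih (qccPartAbs p (S, B) x).1 (qccPartAbs p (S, B) x).2]
    rw [List.foldl_cons]

-- the loop as it first starts on a range: no smalls, no bigs yet
theorem qcc_loop_start (p : Int) (pre suf rest : List Int) :
    (PySem.List.pyRange ((pre.length : Int) + 1) ((pre.length : Int) + 1 + rest.length) 1).foldl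
        (qccSwapStep p) (pre ++ p :: (rest ++ suf), (pre.length : Int) + 1)
      = (pre ++ p :: ((rest.foldl (qccPartAbs p) ([], [])).1
            ++ ((rest.foldl (qccPartAbs p) ([], [])).2 ++ suf)),
         (pre.length : Int) + ((rest.foldl (qccPartAbs p) ([], [])).1.length : Int) + 1) := by
  have h := qcc_loop_inv p pre suf rest [] []
  simp only [List.length_nil, Nat.cast_zero, List.nil_append, add_zero, zero_add] at h
  convert h using 3 <;> push_cast <;> ring

-- the final pivot swap, written out (no context; on the segment alone)
def qccFinalList (p : Int) (S B : List Int) : List Int :=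
  PySem.List.pySetD (PySem.List.pySetD (p :: (S ++ B)) 0
      (PySem.List.pyGetD (p :: (S ++ B)) ((S.length : Int)) 0)) ((S.length : Int))
    (PySem.List.pyGetD (p :: (S ++ B)) 0 0)

theorem qccFinalList_nil (p : Int) (B : List Int) : qccFinalList p [] B = p :: B := by
  unfold qccFinalList
  simp [PySem.List.pySetD_of_nonneg]

theorem qccFinalList_concat (p s : Int) (S0 B : List Int) :
    qccFinalList p (S0 ++ [s]) B = s :: (S0 ++ p :: B) := by
  unfold qccFinalList
  rw [show (((S0 ++ [s]).length : Nat) : Int) = ((S0.length + 1 : Nat) : Int) from by simp]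
  simp only [PySem.List.pyGetD_natCast]
  rw [List.append_assoc, qcc_getD_si]
  simp only [List.singleton_append, List.getD_cons_zero]
  rw [show ((0 : Int)) = (((0 : Nat)) : Int) from rfl]
  simp only [PySem.List.pyGetD_natCast, PySem.List.pySetD_natCast]
  simp only [List.getD_cons_zero, List.set_cons_zero]
  rw [qcc_set_si]
  simp only [List.set_cons_zero]

-- A's low slice of the finalised segment: the smalls rotated one step right
def qccLow (S : List Int) : List Int :=
  PySem.List.slice S (some (-1)) none ++ PySem.List.slice S none (some (-1))

theorem qccLow_nil : qccLow ([] : List Int) = [] := by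
  simp [qccLow, PySem.List.slice]

theorem qccLow_concat (s : Int) (S0 : List Int) : qccLow (S0 ++ [s]) = s :: S0 := by
  unfold qccLow
  rw [PySem.List.slice_from_neg_one, PySem.List.slice_to_neg_one]
  simp only [List.length_append, List.length_cons, List.length_nil]
  rw [show S0.length + (0 + 1) - 1 = S0.length from by omega]
  rw [List.drop_left, List.dropLast_concat]
  simp

theorem qccLow_len (S : List Int) : (qccLow S).length = S.length := by
  rcases List.eq_nil_or_concat S with h0 | ⟨S0, s, hS⟩
  · rw [h0, qccLow_nil]
  · rw [List.concat_eq_append] at hS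
    rw [hS, qccLow_concat]
    simp

-- the finalised segment decomposes as rotated smalls ++ pivot ++ bigs
theorem qccFinalList_decomp (p : Int) (S B : List Int) :
    qccFinalList p S B = qccLow S ++ (p :: B) := by
  rcases List.eq_nil_or_concat S with h0 | ⟨S0, s, hS⟩
  · rw [h0, qccFinalList_nil, qccLow_nil]
    simp
  · rw [List.concat_eq_append] at hS
    rw [hS, qccFinalList_concat, qccLow_concat]
    simp

-- A's slices of the finalised segment
theorem qcc_low_nil (p : Int) (B : List Int) :
    PySem.List.slice (qccFinalList p [] B) none (some (((List.length ([] : List Int)) : Nat) : Int))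
      = qccLow ([] : List Int) := by
  rw [qccFinalList_nil, qccLow_nil]
  rw [PySem.List.slice_to_natCast]
  simp

theorem qcc_low_concat (p s : Int) (S0 B : List Int) :
    PySem.List.slice (qccFinalList p (S0 ++ [s]) B) none (some ((((S0 ++ [s]).length) : Nat) : Int))
      = qccLow (S0 ++ [s]) := by
  rw [qccFinalList_concat, qccLow_concat]
  rw [PySem.List.slice_to_natCast]
  simp only [List.length_append, List.length_cons, List.length_nil]
  rw [show S0.length + (0 + 1) = S0.length + 1 from by omega]
  rw [List.take_succ_cons, List.take_left]

theorem qcc_high_nil (p : Int) (B : List Int) :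
    PySem.List.slice (qccFinalList p [] B) (some (((List.length ([] : List Int) : Nat) : Int) + 1)) none = B := by
  rw [qccFinalList_nil]
  rw [show (((List.length ([] : List Int) : Nat) : Int) + 1) = (((1 : Nat)) : Int) from by simp]
  rw [PySem.List.slice_from_natCast]
  simp

theorem qcc_high_concat (p s : Int) (S0 B : List Int) :
    PySem.List.slice (qccFinalList p (S0 ++ [s]) B) (some ((((S0 ++ [s]).length : Nat) : Int) + 1)) none = B := by
  rw [qccFinalList_concat]
  rw [show ((((S0 ++ [s]).length : Nat) : Int) + 1) = (((S0.length + 2 : Nat)) : Int) from by push_cast; simp; ring]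
  rw [PySem.List.slice_from_natCast]
  rw [show S0.length + 2 = (S0.length + 1) + 1 from by omega]
  rw [List.drop_succ_cons]
  have : (S0 ++ p :: B).drop (S0.length + 1) = (p :: B).drop 1 := by
    rw [← List.drop_drop, List.drop_left]
  rw [this]
  simp

theorem qcc_low_eq (p : Int) (S B : List Int) :
    PySem.List.slice (qccFinalList p S B) none (some ((S.length : Nat) : Int)) = qccLow S := by
  rcases List.eq_nil_or_concat S with h0 | ⟨S0, s, hS⟩
  · rw [h0]; exact qcc_low_nil p B
  · rw [List.concat_eq_append] at hS
    rw [hS]; exact qcc_low_concat p s S0 B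

theorem qcc_high_eq (p : Int) (S B : List Int) :
    PySem.List.slice (qccFinalList p S B) (some (((S.length : Nat) : Int) + 1)) none = B := by
  rcases List.eq_nil_or_concat S with h0 | ⟨S0, s, hS⟩
  · rw [h0]; exact qcc_high_nil p B
  · rw [List.concat_eq_append] at hS
    rw [hS]; exact qcc_high_concat p s S0 B

-- A's swap loop as A runs it: S = B = [] and the range 1 .. len(arr)
theorem qcc_loop_main (p : Int) (rest : List Int) :
    (PySem.List.pyRange 1 (((p :: rest).length : Nat) : Int) 1).foldl (qccSwapStep p) (p :: rest, 1)
      = (p :: ((rest.foldl (qccPartAbs p) ([], [])).1 ++ (rest.foldl (qccPartAbs p) ([], [])).2),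
         ((rest.foldl (qccPartAbs p) ([], [])).1.length : Int) + 1) := by
  have h := qcc_loop_start p [] [] rest
  simp only [List.length_nil, Nat.cast_zero, List.nil_append, List.append_nil, zero_add] at h
  rw [show (((p :: rest).length : Nat) : Int) = 1 + (rest.length : Int) from by
    push_cast [List.length_cons]; ring]
  exact h

-- A on a segment of length ≥ 2, in terms of the abstract partition
theorem qcc_A_unfold (p r1 : Int) (rs : List Int) :
    quicksort_comparison_count (p :: r1 :: rs)
      = ((((p :: r1 :: rs).length : Nat) : Int) - 1
           + (quicksort_comparison_count (qccLow ((r1 :: rs).foldl (qccPartAbs p) ([], [])).1)).1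
           + (quicksort_comparison_count ((r1 :: rs).foldl (qccPartAbs p) ([], [])).2).1,
         (quicksort_comparison_count (qccLow ((r1 :: rs).foldl (qccPartAbs p) ([], [])).1)).2
           ++ [p]
           ++ (quicksort_comparison_count ((r1 :: rs).foldl (qccPartAbs p) ([], [])).2).2) := by
  have hlen2 : ¬ ((p :: r1 :: rs).length ≤ 1) := by simp
  rw [quicksort_comparison_count.eq_def, dif_neg hlen2]
  simp only [PySem.List.pyGetD_zero_cons]
  rw [qcc_loop_main p (r1 :: rs)]
  set S : List Int := ((r1 :: rs).foldl (qccPartAbs p) ([], [])).1 with hS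
  set Bg : List Int := ((r1 :: rs).foldl (qccPartAbs p) ([], [])).2 with hBg
  simp only
  rw [show (((S.length : Int)) + 1 - 1) = ((S.length : Nat) : Int) from by push_cast; ring]
  rw [show
    (PySem.List.pySetD (PySem.List.pySetD (p :: (S ++ Bg)) 0
        (PySem.List.pyGetD (p :: (S ++ Bg)) ((S.length : Nat) : Int) 0)) ((S.length : Nat) : Int)
        (PySem.List.pyGetD (p :: (S ++ Bg)) 0 0))
      = qccFinalList p S Bg from rfl]
  rw [qcc_low_eq, qcc_high_eq]

-- A preserves the length of its argument
theorem qcc_A_len : ∀ (n : Nat) (xs : List Int), xs.length ≤ n →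
    (quicksort_comparison_count xs).2.length = xs.length := by
  intro n
  induction n with
  | zero =>
    intro xs h
    match xs with
    | [] => rw [quicksort_comparison_count.eq_def, dif_pos (by simp)]
  | succ n ih =>
    intro xs h
    match xs with
    | [] => rw [quicksort_comparison_count.eq_def, dif_pos (by simp)]
    | [x] => rw [quicksort_comparison_count.eq_def, dif_pos (by simp)]
    | p :: r1 :: rs =>
      rw [qcc_A_unfold]
      have hsum : ((r1 :: rs).foldl (qccPartAbs p) ([], [])).1.length
          + ((r1 :: rs).foldl (qccPartAbs p) ([], [])).2.length = (r1 :: rs).length := by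
        have := qccPartAbs_lengths p (r1 :: rs) ([], [])
        simpa using this
      have h1 := ih (qccLow ((r1 :: rs).foldl (qccPartAbs p) ([], [])).1)
        (by rw [qccLow_len]; simp only [List.length_cons] at h hsum ⊢; omega)
      have h2 := ih ((r1 :: rs).foldl (qccPartAbs p) ([], [])).2
        (by simp only [List.length_cons] at h hsum ⊢; omega)
      simp only [List.length_append, List.length_cons, List.length_nil, h1, h2, qccLow_len]
      simp only [List.length_cons] at hsum ⊢
      omega

-- indexing a middle segment behind a prefix context
theorem qcc_ctx_getD (pre xs suf : List Int) (k : Nat) (d : Int) (h : k < xs.length) :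
    PySem.List.pyGetD (pre ++ (xs ++ suf)) ((pre.length + k : Nat) : Int) d = xs.getD k d := by
  rw [PySem.List.pyGetD_natCast, qcc_getD_pre]
  rw [List.getD_append _ _ _ _ h]

theorem qcc_ctx_set (pre xs suf : List Int) (k : Nat) (v : Int) (h : k < xs.length) :
    PySem.List.pySetD (pre ++ (xs ++ suf)) ((pre.length + k : Nat) : Int) v = pre ++ (xs.set k v ++ suf) := by
  rw [PySem.List.pySetD_natCast, qcc_set_pre]
  rw [List.set_append, if_pos h]

-- the final pivot swap behind the context
theorem qcc_ctx_final (p : Int) (pre S B suf : List Int) :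
    PySem.List.pySetD
        (PySem.List.pySetD (pre ++ (p :: (S ++ B) ++ suf)) ((pre.length : Nat) : Int)
          (PySem.List.pyGetD (pre ++ (p :: (S ++ B) ++ suf)) ((pre.length + S.length : Nat) : Int) 0))
        ((pre.length + S.length : Nat) : Int)
        (PySem.List.pyGetD (pre ++ (p :: (S ++ B) ++ suf)) ((pre.length : Nat) : Int) 0)
      = pre ++ (qccFinalList p S B ++ suf) := by
  have h0 : (0 : Nat) < (p :: (S ++ B)).length := by simp
  have hS : S.length < (p :: (S ++ B)).length := by simp
  rw [show ((pre.length : Nat) : Int) = ((pre.length + 0 : Nat) : Int) from by simp]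
  rw [qcc_ctx_getD pre _ suf S.length 0 hS, qcc_ctx_getD pre _ suf 0 0 h0]
  rw [qcc_ctx_set pre _ suf 0 _ h0]
  rw [qcc_ctx_set pre _ suf S.length _ (by simpa using hS)]
  congr 1
  congr 1
  unfold qccFinalList
  rw [show ((S.length : Int)) = ((S.length : Nat) : Int) from rfl]
  rw [show ((0 : Int)) = (((0 : Nat)) : Int) from rfl]
  simp only [PySem.List.pyGetD_natCast, PySem.List.pySetD_natCast]

-- the simulation: processing one stacked range runs A on that segment in place
theorem qcc_sim : ∀ (n : Nat) (mid pre suf : List Int) (c : Int) (stk : List (Int × Int)),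
    mid.length ≤ n →
    qccLoop (pre ++ mid ++ suf) c
        (((pre.length : Int), (pre.length : Int) + mid.length - 1) :: stk)
      = qccLoop (pre ++ (quicksort_comparison_count mid).2 ++ suf)
          (c + (quicksort_comparison_count mid).1) stk := by
  intro n
  induction n with
  | zero =>
    intro mid pre suf c stk h
    match mid with
    | [] =>
      have hA : quicksort_comparison_count [] = (0, ([] : List Int)) := by
        rw [quicksort_comparison_count.eq_def, dif_pos (by simp)]
      rw [qccLoop, dif_pos (by simp), hA]
      simp
  | succ n ih =>
    intro mid pre suf c stk h
    match mid with
    | [] =>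
      have hA : quicksort_comparison_count [] = (0, ([] : List Int)) := by
        rw [quicksort_comparison_count.eq_def, dif_pos (by simp)]
      rw [qccLoop, dif_pos (by simp), hA]
      simp
    | [x] =>
      have hA : quicksort_comparison_count [x] = (0, [x]) := by
        rw [quicksort_comparison_count.eq_def, dif_pos (by simp)]
      rw [qccLoop, dif_pos (by simp), hA]
      simp
    | p :: r1 :: rs =>
      have hgt : ¬ ((pre.length : Int) + ((p :: r1 :: rs).length : Int) - 1 ≤ (pre.length : Int)) := by
        push_cast [List.length_cons]; omega
      rw [qccLoop, dif_neg hgt]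
      have hpiv : PySem.List.pyGetD (pre ++ (p :: r1 :: rs) ++ suf) ((pre.length : Int)) 0 = p := by
        rw [List.append_assoc]
        rw [show ((pre.length : Int)) = ((pre.length + 0 : Nat) : Int) from by simp]
        rw [qcc_ctx_getD pre _ suf 0 0 (by simp)]
        rfl
      rw [hpiv]
      dsimp only
      rw [show ((pre.length : Int) + ((p :: r1 :: rs).length : Int) - 1 + 1)
          = (pre.length : Int) + 1 + ((r1 :: rs).length : Int) from by
        push_cast [List.length_cons]; ring]
      rw [show (pre ++ p :: r1 :: rs ++ suf) = pre ++ p :: ((r1 :: rs) ++ suf) from by simp]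
      rw [qcc_loop_start]
      set S : List Int := ((r1 :: rs).foldl (qccPartAbs p) ([], [])).1 with hSdef
      set Bg : List Int := ((r1 :: rs).foldl (qccPartAbs p) ([], [])).2 with hBdef
      dsimp only
      have hsum : S.length + Bg.length = (r1 :: rs).length := by
        have := qccPartAbs_lengths p (r1 :: rs) ([], [])
        simpa [← hSdef, ← hBdef] using this
      rw [show ((pre.length : Int) + (S.length : Int) + 1 - 1) = ((pre.length + S.length : Nat) : Int) from by
        push_cast; ring]
      rw [show ((pre.length : Int)) = ((pre.length : Nat) : Int) from rfl]
      rw [show (pre ++ p :: (S ++ (Bg ++ suf))) = pre ++ (p :: (S ++ Bg) ++ suf) from by simp]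
      rw [qcc_ctx_final, qccFinalList_decomp]
      rw [show (pre ++ (qccLow S ++ p :: Bg ++ suf)) = pre ++ qccLow S ++ (p :: (Bg ++ suf)) from by simp]
      rw [show ((pre.length : Int) + (S.length : Int) + 1 - 2)
          = (pre.length : Int) + ((qccLow S).length : Int) - 1 from by rw [qccLow_len]; push_cast; ring]
      rw [ih (qccLow S) pre (p :: (Bg ++ suf)) _ _
        (by rw [qccLow_len]; simp only [List.length_cons] at h hsum ⊢; omega)]
      have hlow_len : (quicksort_comparison_count (qccLow S)).2.length = S.length := by
        rw [qcc_A_len (qccLow S).length _ le_rfl, qccLow_len]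
      have hpre2 : (((pre ++ (quicksort_comparison_count (qccLow S)).2 ++ [p]).length : Nat) : Int)
          = (pre.length : Int) + (S.length : Int) + 1 := by
        simp [hlow_len]
        ring
      rw [show (pre ++ (quicksort_comparison_count (qccLow S)).2 ++ p :: (Bg ++ suf))
          = (pre ++ (quicksort_comparison_count (qccLow S)).2 ++ [p]) ++ Bg ++ suf from by simp]
      rw [show ((pre.length : Int) + (S.length : Int) + 1)
          = (((pre ++ (quicksort_comparison_count (qccLow S)).2 ++ [p]).length : Nat) : Int) from hpre2.symm]
      rw [show ((pre.length : Int) + (((p :: r1 :: rs).length : Nat) : Int) - 1)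
          = (((pre ++ (quicksort_comparison_count (qccLow S)).2 ++ [p]).length : Nat) : Int)
              + ((Bg.length : Nat) : Int) - 1 from by
        rw [hpre2]
        simp only [List.length_cons] at hsum ⊢
        push_cast
        omega]
      rw [ih Bg (pre ++ (quicksort_comparison_count (qccLow S)).2 ++ [p]) suf _ _
        (by simp only [List.length_cons] at h hsum ⊢; omega)]
      rw [qcc_A_unfold]
      dsimp only
      rw [← hSdef, ← hBdef]
      congr 1
      · simp
      · rw [hpre2]
        simp only [List.length_cons] at hsum ⊢
        push_cast
        omega

-- ===== VERDICT (by name: the statement is the Claim_ definition above) =====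
theorem quicksort_comparison_count_spec : Claim_equal_quicksort_comparison_count := by
  intro arr _
  unfold Spec_quicksort_comparison_count
  unfold quicksort_comparison_count_alt
  have h := qcc_sim arr.length arr [] [] 0 [] le_rfl
  simp only [List.nil_append, List.append_nil, List.length_nil, Nat.cast_zero, zero_add] at h
  rw [h, qccLoop]
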